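-- pv_equiv track=rewrite | github.com/BitBrain19/Cyber | backend/app/services/data_pipeline.py | _determine_log_level
-- ===== SOURCE A (Python) =====
-- def _determine_log_level(message: str) -> str:
--     """Determine log level from message content"""
--     message_lower = message.lower()
--
--     if any(word in message_lower for word in ['error', 'failed', 'denied', 'blocked']):
--         return 'error'
--     elif any(word in message_lower for word in ['warning', 'suspicious', 'unusual']):
--         return 'warning'
--     elif any(word in message_lower for word in ['info', 'success', 'allowed']):
--         return 'info'
--     else:
--         return 'debug'
-- ===== SOURCE B (Python) =====
-- _SEVERITY = {
--     'error': 3, 'failed': 3, 'denied': 3, 'blocked': 3,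
--     'warning': 2, 'suspicious': 2, 'unusual': 2,
--     'info': 1, 'success': 1, 'allowed': 1,
-- }
-- _NAMES = ['debug', 'info', 'warning', 'error']
--
-- def _determine_log_level(message: str) -> str:
--     """Determine log level from message content"""
--     m = message.lower()
--     best = 0
--     for word, sev in _SEVERITY.items():
--         if word in m:
--             best = max(best, sev)
--     return _NAMES[best]
-- ===== Notes on version B (the rewrite author's own statement) =====
-- stated objective: alternative
-- what changed: Replaces the first-match if/elif cascade over keyword groups with an order-independent max-severity accumulation: every keyword carries a numeric severity in one flat map, a single fold takes the maximum severity of all keywords present, and the score indexes the level name.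
import Mathlib
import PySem

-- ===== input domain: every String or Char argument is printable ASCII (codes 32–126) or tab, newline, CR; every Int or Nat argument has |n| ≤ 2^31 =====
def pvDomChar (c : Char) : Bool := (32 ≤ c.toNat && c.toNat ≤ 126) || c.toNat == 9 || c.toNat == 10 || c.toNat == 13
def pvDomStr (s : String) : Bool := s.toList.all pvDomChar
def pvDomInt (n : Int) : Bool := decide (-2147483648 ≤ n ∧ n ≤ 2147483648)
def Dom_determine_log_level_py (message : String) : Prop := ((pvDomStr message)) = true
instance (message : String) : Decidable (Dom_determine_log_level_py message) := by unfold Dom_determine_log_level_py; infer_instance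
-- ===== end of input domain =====

-- ===== PORT A =====
-- Header: B replaces A's first-match if/elif cascade with an order-independent
-- max-severity fold over a flat keyword→score map (alternative decomposition, same cost).
def determine_log_level_py (message : String) : String :=
  let message_lower := PySem.Str.lower message
  if ["error", "failed", "denied", "blocked"].any (fun word => PySem.Str.isIn word message_lower) then
    "error"
  else if ["warning", "suspicious", "unusual"].any (fun word => PySem.Str.isIn word message_lower) then
    "warning"
  else if ["info", "success", "allowed"].any (fun word => PySem.Str.isIn word message_lower) then
    "info"
  else
    "debug"

-- ===== PORT B =====
-- flat keyword → severity score map (_SEVERITY, insertion order)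
def pvSeverity : List (String × Nat) :=
  [("error", 3), ("failed", 3), ("denied", 3), ("blocked", 3),
   ("warning", 2), ("suspicious", 2), ("unusual", 2),
   ("info", 1), ("success", 1), ("allowed", 1)]

-- _NAMES
def pvNames : List String := ["debug", "info", "warning", "error"]

def determine_log_level_py_alt (message : String) : String :=
  let m := PySem.Str.lower message
  let best := pvSeverity.foldl
    (fun best p => if PySem.Str.isIn p.1 m then max best p.2 else best) 0
  pvNames.getD best "debug"

-- ===== PRECONDITION & SPEC =====
def Spec_determine_log_level_py (message : String) (out : String) : Prop := out = determine_log_level_py_alt message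
instance (message : String) (out : String) : Decidable (Spec_determine_log_level_py message out) := by unfold Spec_determine_log_level_py; infer_instance

-- ===== CLAIM (what is proved, stated in full; the proofs are below) =====
def Claim_equal_determine_log_level_py : Prop := ∀ (message : String), Dom_determine_log_level_py message → Spec_determine_log_level_py message (determine_log_level_py message)

-- ===== LEMMAS AND PROOFS =====

-- ===== VERDICT (by name: the statement is the Claim_ definition above) =====
theorem determine_log_level_py_spec : Claim_equal_determine_log_level_py := by
  intro message _
  unfold Spec_determine_log_level_py determine_log_level_py determine_log_level_py_alt pvSeverity pvNames
  simp only [List.any_cons, List.any_nil, List.foldl_cons, List.foldl_nil, Bool.or_false]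
  generalize PySem.Str.isIn "error" (PySem.Str.lower message) = a
  generalize PySem.Str.isIn "failed" (PySem.Str.lower message) = b
  generalize PySem.Str.isIn "denied" (PySem.Str.lower message) = c
  generalize PySem.Str.isIn "blocked" (PySem.Str.lower message) = d
  generalize PySem.Str.isIn "warning" (PySem.Str.lower message) = e
  generalize PySem.Str.isIn "suspicious" (PySem.Str.lower message) = f
  generalize PySem.Str.isIn "unusual" (PySem.Str.lower message) = g
  generalize PySem.Str.isIn "info" (PySem.Str.lower message) = h
  generalize PySem.Str.isIn "success" (PySem.Str.lower message) = i
  generalize PySem.Str.isIn "allowed" (PySem.Str.lower message) = j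
  revert a b c d e f g h i j
  decide
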